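-- pv_equiv track=rewrite | github.com/abhineetjain13/Crawlwise | backend/app/services/acquisition/acquirer.py | _matches_domain_policy
-- ===== SOURCE A (Python) =====
-- def _matches_domain_policy(domain: str, candidates: list[str]) -> bool:
--     normalized_domain = str(domain or "").strip().lower()
--     for candidate in (
--         str(candidate or "").strip().lower() for candidate in candidates if candidate
--     ):
--         if normalized_domain == candidate or normalized_domain.endswith(
--             f".{candidate}"
--         ):
--             return True
--     return False
-- ===== SOURCE B (Python) =====
-- def _matches_domain_policy(domain: str, candidates: list[str]) -> bool:
--     d = str(domain or "").strip().lower()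
--     cands = {str(c or "").strip().lower() for c in candidates if c}
--     suffixes = {d} | {d[i + 1:] for i in range(len(d)) if d[i] == "."}
--     return bool(suffixes & cands)
-- ===== Notes on version B (the rewrite author's own statement) =====
-- stated objective: alternative
-- what changed: B replaces A's per-candidate endswith scan with a set intersection: it builds the set of normalized candidates and the set of the domain's dot-suffixes (the domain plus the substring after each '.') and returns whether they intersect.
import Mathlib
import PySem

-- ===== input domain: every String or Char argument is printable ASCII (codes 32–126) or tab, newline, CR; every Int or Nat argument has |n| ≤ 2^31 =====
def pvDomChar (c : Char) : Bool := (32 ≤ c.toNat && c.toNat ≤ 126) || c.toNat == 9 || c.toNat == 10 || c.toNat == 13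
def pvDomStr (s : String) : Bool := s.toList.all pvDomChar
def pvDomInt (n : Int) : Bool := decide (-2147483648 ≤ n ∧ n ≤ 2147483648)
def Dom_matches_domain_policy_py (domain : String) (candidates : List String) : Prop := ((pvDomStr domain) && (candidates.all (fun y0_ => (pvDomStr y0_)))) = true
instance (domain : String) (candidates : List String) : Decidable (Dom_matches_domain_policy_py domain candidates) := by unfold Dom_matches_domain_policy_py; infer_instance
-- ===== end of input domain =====

-- B replaces A's scan of the candidates with endswith tests by a set intersection between the
-- domain's dot-suffixes and the normalized candidate set (a different decomposition, same cost class).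

-- ===== PORT A =====
-- A: normalize the domain, then scan the candidates (skipping falsy ones), normalizing each and
-- testing equality or endswith("." + candidate); the early 'return True' is List.any.
def matches_domain_policy_py (domain : String) (candidates : List String) : Bool :=
  let normalizedDomain := PySem.Chars.lower (PySem.Chars.strip domain.toList)
  candidates.any (fun candidate =>
    if candidate.toList ≠ [] then
      let c := PySem.Chars.lower (PySem.Chars.strip candidate.toList)
      decide (normalizedDomain = c) || PySem.Chars.endswith normalizedDomain ('.' :: c)
    else false)

-- ===== PORT B =====
-- B: build the set of normalized non-empty candidates, the set of the domain's suffixes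
-- (itself plus the part after each '.'), and test whether the two sets intersect.
def matches_domain_policy_py_alt (domain : String) (candidates : List String) : Bool :=
  let d := PySem.Chars.lower (PySem.Chars.strip domain.toList)
  let cands : PySem.Set (List Char) := PySem.Set.ofList
    ((candidates.filter (fun c => !c.toList.isEmpty)).map
      (fun c => PySem.Chars.lower (PySem.Chars.strip c.toList)))
  let suffixes : PySem.Set (List Char) := PySem.Set.ofList
    (d :: (List.range d.length).filterMap
      (fun i => if d[i]? = some '.' then some (d.drop (i + 1)) else none))
  !(PySem.Set.inter suffixes cands).isEmpty

-- ===== PRECONDITION & SPEC =====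
def Spec_matches_domain_policy_py (domain : String) (candidates : List String) (out : Bool) : Prop := out = matches_domain_policy_py_alt domain candidates
instance (domain : String) (candidates : List String) (out : Bool) : Decidable (Spec_matches_domain_policy_py domain candidates out) := by unfold Spec_matches_domain_policy_py; infer_instance

-- ===== CLAIM (what is proved, stated in full; the proofs are below) =====
def Claim_equal_matches_domain_policy_py : Prop := ∀ (domain : String) (candidates : List String), Dom_matches_domain_policy_py domain candidates → Spec_matches_domain_policy_py domain candidates (matches_domain_policy_py domain candidates)

-- ===== LEMMAS AND PROOFS =====

-- a nonempty-list test used to state 'the intersection is nonempty' as an existential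
theorem not_isEmpty_iff_exists_mem {α : Type} (l : List α) : (!l.isEmpty) = true ↔ ∃ x, x ∈ l := by
  cases l <;> simp

-- '.'-prefixed suffixes of d are exactly the pieces after a dot of d.
theorem dot_suffix_iff (d cn : List Char) :
    ('.' :: cn) <:+ d ↔ ∃ i, ∃ _ : i < d.length, d[i]? = some '.' ∧ d.drop (i + 1) = cn := by
  constructor
  · rintro ⟨t, rfl⟩
    exact ⟨t.length, by simp, by simp, by simp⟩
  · rintro ⟨i, hi, hget, rfl⟩
    have hdrop : d.drop i = '.' :: d.drop (i + 1) := by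
      rw [List.drop_eq_getElem_cons hi]
      simp [List.getElem?_eq_getElem hi] at hget
      simp [hget]
    rw [← hdrop]
    exact List.drop_suffix i d

-- Membership in B's suffix list characterises A's per-candidate test.
theorem mem_suffixList_iff (d cn : List Char) :
    (cn ∈ d :: (List.range d.length).filterMap
        (fun i => if d[i]? = some '.' then some (d.drop (i + 1)) else none))
      ↔ (d = cn ∨ PySem.Chars.endswith d ('.' :: cn) = true) := by
  rw [PySem.Chars.endswith_iff, dot_suffix_iff]
  simp only [List.mem_cons, List.mem_filterMap, List.mem_range]
  constructor
  · rintro (rfl | ⟨i, hi, h⟩)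
    · exact Or.inl rfl
    · refine Or.inr ⟨i, hi, ?_⟩
      by_cases hd : d[i]? = some '.' <;> simp [hd] at h
      exact ⟨hd, h⟩
  · rintro (rfl | ⟨i, hi, hget, hdrop⟩)
    · exact Or.inl rfl
    · exact Or.inr ⟨i, hi, by simp [hget, hdrop]⟩

-- ===== VERDICT (by name: the statement is the Claim_ definition above) =====
theorem matches_domain_policy_py_spec : Claim_equal_matches_domain_policy_py := by
  intro domain candidates _
  unfold Spec_matches_domain_policy_py matches_domain_policy_py matches_domain_policy_py_alt
  rw [Bool.eq_iff_iff]
  simp only [List.any_eq_true, not_isEmpty_iff_exists_mem]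
  constructor
  · rintro ⟨c, hc, hp⟩
    split_ifs at hp with hne
    · simp only [Bool.or_eq_true, decide_eq_true_eq] at hp
      refine ⟨PySem.Chars.lower (PySem.Chars.strip c.toList), ?_⟩
      rw [PySem.Set.mem_inter]
      constructor
      · rw [PySem.Set.mem_ofList, mem_suffixList_iff]
        exact hp
      · rw [PySem.Set.mem_ofList]
        exact List.mem_map_of_mem (List.mem_filter.mpr ⟨hc, by simp [hne]⟩)

  · rintro ⟨x, hx⟩
    rw [PySem.Set.mem_inter, PySem.Set.mem_ofList, PySem.Set.mem_ofList,
      mem_suffixList_iff] at hx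
    obtain ⟨hsuf, hmem⟩ := hx
    obtain ⟨c, hcf, rfl⟩ := List.mem_map.mp hmem
    obtain ⟨hc, hne⟩ := List.mem_filter.mp hcf
    refine ⟨c, hc, ?_⟩
    simp only [Bool.not_eq_true', List.isEmpty_eq_false_iff] at hne
    simp [hne, hsuf]
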